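-- pv_equiv track=rewrite | github.com/KSH23/algorithm_practice | SWEA/4843/4843_02.py | special_sort
-- ===== SOURCE A (Python) =====
-- def special_sort(num_list):
--     for i in range(len(num_list) - 1):
--         if i % 2 == 0:
--             max_idx = i
--             for j in range(i + 1, len(num_list)):
--                 if num_list[j] > num_list[max_idx]:
--                     max_idx = j
--             num_list[max_idx], num_list[i] = num_list[i], num_list[max_idx]
--
--         else:
--             min_idx = i
--             for j in range(i + 1, len(num_list)):
--                 if num_list[j] < num_list[min_idx]:
--                     min_idx = j
--             num_list[min_idx], num_list[i] = num_list[i], num_list[min_idx]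
--
--     return num_list[:10]
-- ===== SOURCE B (Python) =====
-- def special_sort(num_list):
--     s = sorted(num_list)
--     out = []
--     i, j = 0, len(s) - 1
--     while i <= j:
--         out.append(s[j])
--         if i < j:
--             out.append(s[i])
--         i += 1
--         j -= 1
--     return out[:10]
-- ===== Notes on version B (the rewrite author's own statement) =====
-- stated objective: faster
-- what changed: Replaces the alternating selection-sort (repeated linear scans for max/min with in-place swaps) by one sort followed by a two-pointer interleave from both ends, taking the first 10.
import Mathlib
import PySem

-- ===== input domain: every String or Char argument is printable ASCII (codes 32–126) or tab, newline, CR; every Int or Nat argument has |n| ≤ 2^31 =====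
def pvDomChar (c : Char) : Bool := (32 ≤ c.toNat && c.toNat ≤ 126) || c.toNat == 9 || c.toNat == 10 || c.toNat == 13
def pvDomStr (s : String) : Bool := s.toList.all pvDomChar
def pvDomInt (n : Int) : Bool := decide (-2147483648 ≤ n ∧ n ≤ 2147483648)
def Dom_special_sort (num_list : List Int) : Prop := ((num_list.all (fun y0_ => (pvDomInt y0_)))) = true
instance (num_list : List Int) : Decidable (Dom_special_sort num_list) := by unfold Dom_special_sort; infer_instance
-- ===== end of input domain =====

-- B replaces A's alternating selection scans (O(n^2)) by sort + two-pointer interleave (O(n log n));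
-- A sorts num_list in place (caller-visible mutation), B does not: the equivalence proved is about the RETURN value only.


-- ===== PORT A =====
-- inner loop 'for j in range(i+1, len(..)): if num_list[j] > num_list[max_idx]: max_idx = j'
def aArgMax (l : List Int) (i n : Int) : Int :=
  (PySem.List.pyRange (i + 1) n 1).foldl
    (fun mi j => if PySem.List.pyGetD l j 0 > PySem.List.pyGetD l mi 0 then j else mi) i

def aArgMin (l : List Int) (i n : Int) : Int :=
  (PySem.List.pyRange (i + 1) n 1).foldl
    (fun mi j => if PySem.List.pyGetD l j 0 < PySem.List.pyGetD l mi 0 then j else mi) i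

-- 'num_list[idx], num_list[i] = num_list[i], num_list[idx]'
def aSwap (l : List Int) (p i : Int) : List Int :=
  PySem.List.pySetD (PySem.List.pySetD l p (PySem.List.pyGetD l i 0)) i (PySem.List.pyGetD l p 0)

def aBody (l : List Int) (i : Int) : List Int :=
  if PySem.Int.mod i 2 == 0 then aSwap l (aArgMax l i (l.length : Int)) i
  else aSwap l (aArgMin l i (l.length : Int)) i

def special_sort (num_list : List Int) : List Int :=
  PySem.List.slice
    ((PySem.List.pyRange 0 ((num_list.length : Int) - 1) 1).foldl aBody num_list)
    none (some 10)

-- ===== PORT B =====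
-- the 'while i <= j' two-pointer loop of Source B; fuel bounds the number of iterations
def bGo (s : List Int) : Nat → Int → Int → List Int
  | 0, _, _ => []
  | fuel + 1, i, j =>
    if i ≤ j then
      PySem.List.pyGetD s j 0 ::
        ((if i < j then [PySem.List.pyGetD s i 0] else []) ++ bGo s fuel (i + 1) (j - 1))
    else []

def special_sort_alt (num_list : List Int) : List Int :=
  let s := PySem.List.sorted num_list (fun x => x) false
  PySem.List.slice (bGo s s.length 0 ((s.length : Int) - 1)) none (some 10)

-- ===== PRECONDITION & SPEC =====
def Spec_special_sort (num_list : List Int) (out : List Int) : Prop := out = special_sort_alt num_list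
instance (num_list : List Int) (out : List Int) : Decidable (Spec_special_sort num_list out) := by unfold Spec_special_sort; infer_instance

-- ===== CLAIM (what is proved, stated in full; the proofs are below) =====
def Claim_equal_special_sort : Prop := ∀ (num_list : List Int), Dom_special_sort num_list → Spec_special_sort num_list (special_sort num_list)

-- ===== LEMMAS AND PROOFS =====

-- math weave: alternately the largest (from the back) and the smallest (from the front) of a sorted list
def wv (b : Bool) (s : List Int) : List Int :=
  match s with
  | [] => []
  | x :: t =>
    if b then (x :: t).getLast (by simp) :: wv false (x :: t).dropLast
    else x :: wv true t
termination_by s.length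
decreasing_by
  · simp [List.length_dropLast]
  · simp

theorem wv_cons (b : Bool) (x : Int) (t : List Int) :
    wv b (x :: t) = if b then (x :: t).getLast (by simp) :: wv false (x :: t).dropLast
      else x :: wv true t := by
  rw [wv]

-- one A-step on the unprocessed suffix: find the first arg-extremum, swap it to the front
def argB (gt : Bool) (t : List Int) : Int :=
  if gt then
    (PySem.List.pyRange 1 (t.length : Int) 1).foldl
      (fun mi j => if PySem.List.pyGetD t j 0 > PySem.List.pyGetD t mi 0 then j else mi) 0
  else
    (PySem.List.pyRange 1 (t.length : Int) 1).foldl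
      (fun mi j => if PySem.List.pyGetD t j 0 < PySem.List.pyGetD t mi 0 then j else mi) 0

def stepB (gt : Bool) (t : List Int) : List Int :=
  PySem.List.pySetD (PySem.List.pySetD t (argB gt t) (PySem.List.pyGetD t 0 0)) 0
    (PySem.List.pyGetD t (argB gt t) 0)

theorem length_stepB (gt : Bool) (t : List Int) : (stepB gt t).length = t.length := by
  simp [stepB, PySem.List.length_pySetD]

-- A's final list as peeling extrema off the unprocessed suffix
def peel (b : Bool) (t : List Int) : List Int :=
  match t with
  | [] => []
  | x :: u => (stepB b (x :: u)).headI :: peel (!b) (stepB b (x :: u)).tail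
termination_by t.length
decreasing_by
  simp [List.length_tail, length_stepB]

theorem peel_cons (b : Bool) (x : Int) (u : List Int) :
    peel b (x :: u) = (stepB b (x :: u)).headI :: peel (!b) (stepB b (x :: u)).tail := by
  rw [peel]

theorem argAuxMax (t : List Int) (js : List Int) :
    ∀ (m0 : Int), 0 ≤ m0 → m0 < (t.length : Int) → (∀ j ∈ js, 0 ≤ j ∧ j < (t.length : Int)) →
    (0 ≤ js.foldl (fun mi j => if PySem.List.pyGetD t j 0 > PySem.List.pyGetD t mi 0 then j else mi) m0 ∧
     js.foldl (fun mi j => if PySem.List.pyGetD t j 0 > PySem.List.pyGetD t mi 0 then j else mi) m0 < (t.length : Int)) ∧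
    PySem.List.pyGetD t m0 0 ≤ PySem.List.pyGetD t (js.foldl (fun mi j => if PySem.List.pyGetD t j 0 > PySem.List.pyGetD t mi 0 then j else mi) m0) 0 ∧
    ∀ k ∈ js, PySem.List.pyGetD t k 0 ≤ PySem.List.pyGetD t (js.foldl (fun mi j => if PySem.List.pyGetD t j 0 > PySem.List.pyGetD t mi 0 then j else mi) m0) 0 := by
  induction js with
  | nil => intro m0 h0 h1 _; exact ⟨⟨h0, h1⟩, le_refl _, by simp⟩
  | cons j js ih =>
    intro m0 h0 h1 hb
    have hj := hb j (by simp)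
    simp only [List.foldl_cons]
    by_cases hc : PySem.List.pyGetD t j 0 > PySem.List.pyGetD t m0 0
    · rw [if_pos hc]
      obtain ⟨hr, hb0, hball⟩ := ih j hj.1 hj.2 (fun x hx => hb x (by simp [hx]))
      exact ⟨hr, le_trans (le_of_lt hc) hb0, fun k hk => by
        rcases List.mem_cons.mp hk with rfl | hk'
        · exact hb0
        · exact hball k hk'⟩
    · rw [if_neg hc]
      obtain ⟨hr, hb0, hball⟩ := ih m0 h0 h1 (fun x hx => hb x (by simp [hx]))
      exact ⟨hr, hb0, fun k hk => by
        rcases List.mem_cons.mp hk with rfl | hk'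
        · exact le_trans (le_of_not_gt hc) hb0
        · exact hball k hk'⟩

theorem argAuxMin (t : List Int) (js : List Int) :
    ∀ (m0 : Int), 0 ≤ m0 → m0 < (t.length : Int) → (∀ j ∈ js, 0 ≤ j ∧ j < (t.length : Int)) →
    (0 ≤ js.foldl (fun mi j => if PySem.List.pyGetD t j 0 < PySem.List.pyGetD t mi 0 then j else mi) m0 ∧
     js.foldl (fun mi j => if PySem.List.pyGetD t j 0 < PySem.List.pyGetD t mi 0 then j else mi) m0 < (t.length : Int)) ∧
    PySem.List.pyGetD t (js.foldl (fun mi j => if PySem.List.pyGetD t j 0 < PySem.List.pyGetD t mi 0 then j else mi) m0) 0 ≤ PySem.List.pyGetD t m0 0 ∧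
    ∀ k ∈ js, PySem.List.pyGetD t (js.foldl (fun mi j => if PySem.List.pyGetD t j 0 < PySem.List.pyGetD t mi 0 then j else mi) m0) 0 ≤ PySem.List.pyGetD t k 0 := by
  induction js with
  | nil => intro m0 h0 h1 _; exact ⟨⟨h0, h1⟩, le_refl _, by simp⟩
  | cons j js ih =>
    intro m0 h0 h1 hb
    have hj := hb j (by simp)
    simp only [List.foldl_cons]
    by_cases hc : PySem.List.pyGetD t j 0 < PySem.List.pyGetD t m0 0
    · rw [if_pos hc]
      obtain ⟨hr, hb0, hball⟩ := ih j hj.1 hj.2 (fun x hx => hb x (by simp [hx]))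
      exact ⟨hr, le_trans hb0 (le_of_lt hc), fun k hk => by
        rcases List.mem_cons.mp hk with rfl | hk'
        · exact hb0
        · exact hball k hk'⟩
    · rw [if_neg hc]
      obtain ⟨hr, hb0, hball⟩ := ih m0 h0 h1 (fun x hx => hb x (by simp [hx]))
      exact ⟨hr, hb0, fun k hk => by
        rcases List.mem_cons.mp hk with rfl | hk'
        · exact le_trans hb0 (not_lt.mp hc)
        · exact hball k hk'⟩

theorem argB_spec (gt : Bool) (t : List Int) (ht : t ≠ []) :
    (0 ≤ argB gt t ∧ argB gt t < (t.length : Int)) ∧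
      ∀ k : Int, 0 ≤ k → k < (t.length : Int) →
        (if gt then PySem.List.pyGetD t k 0 ≤ PySem.List.pyGetD t (argB gt t) 0
         else PySem.List.pyGetD t (argB gt t) 0 ≤ PySem.List.pyGetD t k 0) := by
  have hlen : 0 < t.length := List.length_pos_iff.mpr ht
  have hlen' : (0 : Int) < (t.length : Int) := by exact_mod_cast hlen
  have hbnd : ∀ j ∈ PySem.List.pyRange 1 (t.length : Int) 1, 0 ≤ j ∧ j < (t.length : Int) := by
    intro j hj
    have := PySem.List.mem_pyRange_one.mp hj
    omega
  cases gt
  · have harg : argB false t = (PySem.List.pyRange 1 (t.length : Int) 1).foldl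
        (fun mi j => if PySem.List.pyGetD t j 0 < PySem.List.pyGetD t mi 0 then j else mi) 0 := by
      simp [argB]
    obtain ⟨hr, hb0, hball⟩ := argAuxMin t (PySem.List.pyRange 1 (t.length : Int) 1) 0 (le_refl 0) hlen' hbnd
    rw [harg]
    refine ⟨hr, fun k hk0 hk1 => ?_⟩
    simp only [Bool.false_eq_true, if_false]
    by_cases hk : k = 0
    · subst hk; exact hb0
    · exact hball k (PySem.List.mem_pyRange_one.mpr ⟨by omega, hk1⟩)
  · have harg : argB true t = (PySem.List.pyRange 1 (t.length : Int) 1).foldl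
        (fun mi j => if PySem.List.pyGetD t j 0 > PySem.List.pyGetD t mi 0 then j else mi) 0 := by
      simp [argB]
    obtain ⟨hr, hb0, hball⟩ := argAuxMax t (PySem.List.pyRange 1 (t.length : Int) 1) 0 (le_refl 0) hlen' hbnd
    rw [harg]
    refine ⟨hr, fun k hk0 hk1 => ?_⟩
    simp only [if_true]
    by_cases hk : k = 0
    · subst hk; exact hb0
    · exact hball k (PySem.List.mem_pyRange_one.mpr ⟨by omega, hk1⟩)

theorem set_zero_cons {α : Type} (l : List α) (v : α) (h : l ≠ []) :
    l.set 0 v = v :: l.tail := by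
  cases l with
  | nil => simp at h
  | cons x u => rfl

theorem stepB_cons (gt : Bool) (x : Int) (u : List Int) :
    stepB gt (x :: u) = PySem.List.pyGetD (x :: u) (argB gt (x :: u)) 0 ::
      ((x :: u).set (argB gt (x :: u)).toNat x).tail := by
  have hp := (argB_spec gt (x :: u) (by simp)).1
  have h0 : PySem.List.pyGetD (x :: u) 0 0 = x := PySem.List.pyGetD_zero_cons x u 0
  have hne : ((x :: u).set (argB gt (x :: u)).toNat x) ≠ [] := by
    intro h
    have := congrArg List.length h
    simp at this
  rw [stepB, h0, PySem.List.pySetD_of_nonneg _ _ hp.1, PySem.List.pySetD_of_nonneg _ _ (le_refl 0)]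
  rw [Int.toNat_zero, set_zero_cons _ _ hne]

theorem cons_set_perm {α : Type} : ∀ (u : List α) (p : Nat) (x : α) (h : p < u.length),
    (x :: u).Perm (u[p]'h :: u.set p x) := by
  intro u p
  induction p generalizing u with
  | zero =>
    intro x h
    cases u with
    | nil => simp at h
    | cons y u' =>
      simpa using (List.Perm.swap y x u')
  | succ p ih =>
    intro x h
    cases u with
    | nil => simp at h
    | cons y u' =>
      have h' : p < u'.length := by simpa using h
      have s1 : (x :: y :: u').Perm (y :: x :: u') := by
        simpa using (List.Perm.swap y x u')
      have s2 : (y :: x :: u').Perm (y :: u'[p]'h' :: u'.set p x) :=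
        (ih u' x h').cons y
      have s3 : (y :: u'[p]'h' :: u'.set p x).Perm (u'[p]'h' :: y :: u'.set p x) := by
        simpa using (List.Perm.swap (u'[p]'h') y (u'.set p x))
      simpa using (s1.trans s2).trans s3

theorem cons_getElem_set_tail_perm {α : Type} (x : α) (u : List α) (q : Nat)
    (hq : q < (x :: u).length) :
    ((x :: u)[q]'hq :: ((x :: u).set q x).tail).Perm (x :: u) := by
  cases q with
  | zero => simp
  | succ q =>
    have hq' : q < u.length := by simpa using hq
    simpa using (cons_set_perm u q x hq').symm

theorem stepB_perm (gt : Bool) (t : List Int) : (stepB gt t).Perm t := by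
  cases t with
  | nil => simp [stepB, PySem.List.pySetD_of_nonneg, argB]
  | cons x u =>
    have hp := (argB_spec gt (x :: u) (by simp)).1
    have hq : (argB gt (x :: u)).toNat < (x :: u).length := by omega
    rw [stepB_cons, PySem.List.pyGetD_eq_getElem (x :: u) 0 hp.1 hp.2]
    exact cons_getElem_set_tail_perm x u (argB gt (x :: u)).toNat hq

-- the maximum sits at the end of a sorted list, the minimum at its head
theorem last_of_max (s : List Int) (hpw : s.Pairwise (· ≤ ·)) (hne : s ≠ []) (m : Int)
    (hm : m ∈ s) (hmax : ∀ y ∈ s, y ≤ m) : s.getLast hne = m := by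
  have hsplit : s.dropLast ++ [s.getLast hne] = s := List.dropLast_append_getLast hne
  have hlast_mem : s.getLast hne ∈ s := List.getLast_mem hne
  have h1 : s.getLast hne ≤ m := hmax _ hlast_mem
  have h2 : m ≤ s.getLast hne := by
    rw [← hsplit] at hpw hm
    rcases List.mem_append.mp hm with h | h
    · exact (List.pairwise_append.mp hpw).2.2 m h _ (by simp)
    · simp at h; omega
  omega

theorem max_decomp (s : List Int) (hpw : s.Pairwise (· ≤ ·)) (hne : s ≠ []) (m : Int)
    (hm : m ∈ s) (hmax : ∀ y ∈ s, y ≤ m) :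
    ∃ s', s = s' ++ [m] ∧ s'.Pairwise (· ≤ ·) := by
  refine ⟨s.dropLast, ?_, hpw.sublist (List.dropLast_sublist s)⟩
  have h := List.dropLast_append_getLast hne
  rw [last_of_max s hpw hne m hm hmax] at h
  exact h.symm

theorem min_decomp (s : List Int) (hpw : s.Pairwise (· ≤ ·)) (hne : s ≠ []) (m : Int)
    (hm : m ∈ s) (hmin : ∀ y ∈ s, m ≤ y) :
    ∃ s', s = m :: s' ∧ s'.Pairwise (· ≤ ·) := by
  cases s with
  | nil => simp at hne
  | cons sh st =>
    have hsh : sh = m := by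
      have h1 : m ≤ sh := hmin sh (by simp)
      have h2 : sh ≤ m := by
        rcases List.mem_cons.mp hm with rfl | h
        · omega
        · exact (List.pairwise_cons.mp hpw).1 m h
      omega
    exact ⟨st, by rw [hsh], (List.pairwise_cons.mp hpw).2⟩

theorem wv_true_concat (s' : List Int) (m : Int) : wv true (s' ++ [m]) = m :: wv false s' := by
  obtain ⟨y, v, hyv⟩ : ∃ y v, s' ++ [m] = y :: v := by
    cases h : s' ++ [m] with
    | nil => simp at h
    | cons y v => exact ⟨y, v, rfl⟩
  rw [hyv, wv_cons]
  simp only [if_true]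
  congr 1
  · have h1 : (y :: v).getLast? = some ((y :: v).getLast (by simp)) := by
      rw [List.getLast?_eq_some_getLast]
    have h2 : (s' ++ [m]).getLast? = some m := List.getLast?_concat
    rw [hyv] at h2
    rw [h2] at h1
    exact (Option.some.inj h1).symm
  · have h3 := congrArg List.dropLast hyv
    rw [List.dropLast_concat] at h3
    rw [← h3]

theorem wv_false_cons (m : Int) (s' : List Int) : wv false (m :: s') = m :: wv true s' := by
  rw [wv_cons]; simp

theorem peel_eq_wv (b : Bool) (t : List Int) :
    peel b t = wv b (PySem.List.sorted t (fun x => x) false) := by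
  have main : ∀ (n : Nat) (t : List Int) (b : Bool), t.length ≤ n →
      peel b t = wv b (PySem.List.sorted t (fun x => x) false) := by
    intro n
    induction n with
    | zero =>
      intro t b hlen
      have : t = [] := List.eq_nil_of_length_eq_zero (by omega)
      subst this
      simp [peel, wv, PySem.List.sorted]
    | succ n ih =>
      intro t b hlen
      cases t with
      | nil => simp [peel, wv, PySem.List.sorted]
      | cons x u =>
        have htne : (x :: u) ≠ [] := by simp
        have hsp : (PySem.List.sorted (x :: u) (fun x => x) false).Perm (x :: u) :=
          PySem.List.sorted_perm (x :: u) _ false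
        have hpw : (PySem.List.sorted (x :: u) (fun x => x) false).Pairwise (· ≤ ·) :=
          PySem.List.sorted_pairwise (x :: u) _
        have hsne : PySem.List.sorted (x :: u) (fun x => x) false ≠ [] := by
          intro h
          exact htne ((PySem.List.sorted_eq_nil_iff (x :: u) _ false).mp h)
        have hp := argB_spec b (x :: u) htne
        set p := argB b (x :: u) with hpdef
        set vp := PySem.List.pyGetD (x :: u) p 0 with hvpdef
        have hvp_mem : vp ∈ (x :: u) := by
          rw [hvpdef, PySem.List.pyGetD_eq_getElem (x :: u) 0 hp.1.1 hp.1.2]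
          exact List.getElem_mem _
        have hvp_mem_s : vp ∈ PySem.List.sorted (x :: u) (fun x => x) false :=
          hsp.mem_iff.mpr hvp_mem
        set r := ((x :: u).set p.toNat x).tail with hrdef
        have hstep : stepB b (x :: u) = vp :: r := stepB_cons b x u
        have hperm : (vp :: r).Perm (x :: u) := hstep ▸ stepB_perm b (x :: u)
        have hrlen : r.length ≤ n := by
          have := hperm.length_eq
          simp at this hlen
          omega
        have hpeel : peel b (x :: u) = vp :: peel (!b) r := by
          rw [peel_cons, hstep]
          simp
        have hval : ∀ y ∈ (x :: u), (if b then y ≤ vp else vp ≤ y) := by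
          intro y hy
          obtain ⟨k, hk, hyk⟩ := List.mem_iff_getElem.mp hy
          have hkk := hp.2 (k : Int) (by omega) (by exact_mod_cast hk)
          rw [PySem.List.pyGetD_eq_getElem (x :: u) 0 (by omega) (by exact_mod_cast hk)] at hkk
          simp only [Int.toNat_natCast] at hkk
          rw [hyk] at hkk
          exact hkk
        cases b
        · -- min step
          have hmin : ∀ y ∈ PySem.List.sorted (x :: u) (fun x => x) false, vp ≤ y := by
            intro y hy
            have := hval y (hsp.mem_iff.mp hy)
            simpa using this
          obtain ⟨s', hseq, hs'pw⟩ := min_decomp _ hpw hsne vp hvp_mem_s hmin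
          have hrperm : s'.Perm r := by
            have h1 : (vp :: r).Perm (vp :: s') := by
              rw [← hseq]
              exact hperm.trans hsp.symm
            exact (h1.cons_inv).symm
          have hsorted_r : PySem.List.sorted r (fun x => x) false = s' :=
            PySem.List.sorted_id_eq_of_perm_of_pairwise r s' hrperm hs'pw
          rw [hpeel, hseq, wv_false_cons]
          have := ih r true hrlen
          rw [hsorted_r] at this
          simp [this]
        · -- max step
          have hmax : ∀ y ∈ PySem.List.sorted (x :: u) (fun x => x) false, y ≤ vp := by
            intro y hy
            have := hval y (hsp.mem_iff.mp hy)
            simpa using this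
          obtain ⟨s', hseq, hs'pw⟩ := max_decomp _ hpw hsne vp hvp_mem_s hmax
          have hrperm : s'.Perm r := by
            have h1 : (vp :: r).Perm (vp :: s') := by
              have h2 : (s' ++ [vp]).Perm (vp :: s') := List.perm_append_singleton vp s'
              exact (hperm.trans hsp.symm).trans (hseq ▸ h2)
            exact (h1.cons_inv).symm
          have hsorted_r : PySem.List.sorted r (fun x => x) false = s' :=
            PySem.List.sorted_id_eq_of_perm_of_pairwise r s' hrperm hs'pw
          rw [hpeel, hseq, wv_true_concat]
          have := ih r false hrlen
          rw [hsorted_r] at this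
          simp [this]
  exact main (t.length) t b (le_refl _)

theorem wv_nil (b : Bool) : wv b [] = [] := by rw [wv]

theorem peel_nil (b : Bool) : peel b [] = [] := by rw [peel]

theorem argB_singleton (b : Bool) (x : Int) : argB b [x] = 0 := by
  cases b <;> simp [argB, PySem.List.pyRange_one_eq_nil]

theorem peel_singleton (b : Bool) (x : Int) : peel b [x] = [x] := by
  have hstep : stepB b [x] = [x] := by
    simp [stepB, argB_singleton, PySem.List.pySetD_of_nonneg, PySem.List.pyGetD_zero_cons]
  rw [peel_cons, hstep]
  simp [peel_nil]

theorem peel_small (b : Bool) (t : List Int) (h : t.length ≤ 1) : peel b t = t := by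
  cases t with
  | nil => exact peel_nil b
  | cons x u =>
    cases u with
    | nil => exact peel_singleton b x
    | cons y v => simp at h

theorem pyGetD_drop (l : List Int) (a : Nat) (j : Int) (hj : 0 ≤ j) (d : Int) :
    PySem.List.pyGetD (l.drop a) j d = PySem.List.pyGetD l ((a : Int) + j) d := by
  have hj' : j = ((j.toNat : Nat) : Int) := by omega
  rw [hj', PySem.List.pyGetD_natCast,
    show (a : Int) + ((j.toNat : Nat) : Int) = ((a + j.toNat : Nat) : Int) by push_cast; ring,
    PySem.List.pyGetD_natCast]
  simp [List.getD_eq_getElem?_getD, List.getElem?_drop]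

theorem foldl_map_shift (i : Int) (F G : Int → Int → Int) (P : Int → Prop) :
    ∀ (js : List Int) (m0 init : Int), (∀ m j, P m → j ∈ js → F (i + m) (i + j) = i + G m j ∧ P (G m j)) →
      P m0 → init = i + m0 → (js.map (fun j => i + j)).foldl F init = i + js.foldl G m0 := by
  intro js
  induction js with
  | nil => intro m0 init _ _ h; simp [h]
  | cons j js ih =>
    intro m0 init h hP hinit
    simp only [List.map_cons, List.foldl_cons]
    obtain ⟨he, hp⟩ := h m0 j hP (by simp)
    rw [hinit, he]
    exact ih (G m0 j) _ (fun m j' hm hj' => h m j' hm (by simp [hj'])) hp rfl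

theorem pyRange_shift (i c n : Int) :
    PySem.List.pyRange (i + c) (i + n) 1 = (PySem.List.pyRange c n 1).map (fun j => i + j) := by
  rw [PySem.List.pyRange_one, PySem.List.pyRange_one, List.map_map]
  have h : (i + n - (i + c)).toNat = (n - c).toNat := by omega
  rw [h]
  apply List.map_congr_left
  intro a _
  simp [Function.comp]
  ring

theorem aArgMax_shift (l : List Int) (i : Nat) (hi : i < l.length) :
    aArgMax l (i : Int) (l.length : Int) = (i : Int) + argB true (l.drop i) := by
  have htlen : (((l.drop i).length : Nat) : Int) = (l.length : Int) - (i : Int) := by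
    rw [List.length_drop]; omega
  have harg : argB true (l.drop i) = (PySem.List.pyRange 1 (((l.drop i).length : Nat) : Int) 1).foldl
      (fun mi j => if PySem.List.pyGetD (l.drop i) j 0 > PySem.List.pyGetD (l.drop i) mi 0 then j else mi) 0 := by
    simp [argB]
  have hrange : PySem.List.pyRange ((i : Int) + 1) (l.length : Int) 1 =
      (PySem.List.pyRange 1 (((l.drop i).length : Nat) : Int) 1).map (fun j => (i : Int) + j) := by
    have hlen2 : (l.length : Int) = (i : Int) + (((l.drop i).length : Nat) : Int) := by
      rw [List.length_drop]; omega
    rw [hlen2, ← pyRange_shift]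
  rw [aArgMax, harg, hrange]
  apply foldl_map_shift (i : Int) _ _ (fun m => 0 ≤ m ∧ m < (((l.drop i).length : Nat) : Int))
  · intro m j hm hj
    have hjb := PySem.List.mem_pyRange_one.mp hj
    constructor
    · rw [← pyGetD_drop l i j (by omega) 0, ← pyGetD_drop l i m (by omega) 0]
      split <;> simp
    · split
      · exact ⟨by omega, by omega⟩
      · exact hm
  · exact ⟨le_refl 0, by omega⟩
  · simp

theorem aArgMin_shift (l : List Int) (i : Nat) (hi : i < l.length) :
    aArgMin l (i : Int) (l.length : Int) = (i : Int) + argB false (l.drop i) := by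
  have harg : argB false (l.drop i) = (PySem.List.pyRange 1 (((l.drop i).length : Nat) : Int) 1).foldl
      (fun mi j => if PySem.List.pyGetD (l.drop i) j 0 < PySem.List.pyGetD (l.drop i) mi 0 then j else mi) 0 := by
    simp [argB]
  have hrange : PySem.List.pyRange ((i : Int) + 1) (l.length : Int) 1 =
      (PySem.List.pyRange 1 (((l.drop i).length : Nat) : Int) 1).map (fun j => (i : Int) + j) := by
    have hlen2 : (l.length : Int) = (i : Int) + (((l.drop i).length : Nat) : Int) := by
      rw [List.length_drop]; omega
    rw [hlen2, ← pyRange_shift]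
  rw [aArgMin, harg, hrange]
  apply foldl_map_shift (i : Int) _ _ (fun m => 0 ≤ m ∧ m < (((l.drop i).length : Nat) : Int))
  · intro m j hm hj
    have hjb := PySem.List.mem_pyRange_one.mp hj
    constructor
    · rw [← pyGetD_drop l i j (by omega) 0, ← pyGetD_drop l i m (by omega) 0]
      split <;> simp
    · split
      · exact ⟨by omega, by omega⟩
      · exact hm
  · exact ⟨le_refl 0, by rw [List.length_drop]; omega⟩
  · simp

theorem set_split {α : Type} : ∀ (i : Nat) (l : List α) (k : Nat) (v : α), i ≤ l.length →
    l.set (i + k) v = l.take i ++ (l.drop i).set k v := by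
  intro i
  induction i with
  | zero => intro l k v _; simp
  | succ i ih =>
    intro l k v h
    cases l with
    | nil => simp at h
    | cons x l' =>
      have h1 : (i + 1) + k = (i + k) + 1 := by omega
      rw [h1]
      simp only [List.set_cons_succ, List.take_succ_cons, List.drop_succ_cons, List.cons_append]
      rw [ih l' k v (by simpa using h)]

theorem set_append_left_len {α : Type} : ∀ (l₁ : List α) (l₂ : List α) (v : α),
    (l₁ ++ l₂).set l₁.length v = l₁ ++ l₂.set 0 v := by
  intro l₁
  induction l₁ with
  | nil => intro l₂ v; rfl
  | cons x l₁ ih => intro l₂ v; simp only [List.cons_append, List.length_cons, List.set_cons_succ, ih]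

theorem take_append_len {α : Type} : ∀ (A B : List α) (i : Nat), A.length = i →
    (A ++ B).take (i + 1) = A ++ B.take 1 := by
  intro A
  induction A with
  | nil => intro B i h; subst h; rfl
  | cons x A ih =>
    intro B i h
    cases i with
    | zero => simp at h
    | succ i =>
      simp only [List.cons_append, List.take_succ_cons]
      rw [ih B i (by simpa using h)]

theorem drop_append_len {α : Type} : ∀ (A B : List α) (i : Nat), A.length = i →
    (A ++ B).drop (i + 1) = B.drop 1 := by
  intro A
  induction A with
  | nil => intro B i h; subst h; rfl
  | cons x A ih =>
    intro B i h
    cases i with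
    | zero => simp at h
    | succ i =>
      simp only [List.cons_append, List.drop_succ_cons]
      exact ih B i (by simpa using h)

theorem aSwap_step (gt : Bool) (l : List Int) (i : Nat) (hi : i < l.length) :
    aSwap l ((i : Int) + argB gt (l.drop i)) (i : Int) = l.take i ++ stepB gt (l.drop i) := by
  have htne : l.drop i ≠ [] := by
    intro h
    have := congrArg List.length h
    simp at this
    omega
  obtain ⟨⟨hp0, hp1⟩, -⟩ := argB_spec gt (l.drop i) htne
  have hdlen : (((l.drop i).length : Nat) : Int) = (l.length : Int) - (i : Int) := by
    rw [List.length_drop]; omega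
  have hgi : PySem.List.pyGetD l (i : Int) 0 = PySem.List.pyGetD (l.drop i) 0 0 := by
    rw [pyGetD_drop l i 0 (le_refl 0) 0, add_zero]
  have hgp : PySem.List.pyGetD l ((i : Int) + argB gt (l.drop i)) 0 =
      PySem.List.pyGetD (l.drop i) (argB gt (l.drop i)) 0 :=
    (pyGetD_drop l i _ hp0 0).symm
  have hinner : PySem.List.pySetD l ((i : Int) + argB gt (l.drop i)) (PySem.List.pyGetD (l.drop i) 0 0) =
      l.set ((i : Int) + argB gt (l.drop i)).toNat (PySem.List.pyGetD (l.drop i) 0 0) :=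
    PySem.List.pySetD_of_nonneg _ _ (by omega)
  rw [aSwap, hgi, hgp, hinner, PySem.List.pySetD_of_nonneg _ _ (by omega : (0 : Int) ≤ (i : Int))]
  have h1 : ((i : Int) + argB gt (l.drop i)).toNat = i + (argB gt (l.drop i)).toNat := by omega
  have h2 : ((i : Int)).toNat = i := by omega
  rw [h1, h2, set_split i l _ _ (by omega)]
  have h3 : (l.take i).length = i := by simp; omega
  have h4 := set_append_left_len (l.take i)
    ((l.drop i).set (argB gt (l.drop i)).toNat (PySem.List.pyGetD (l.drop i) 0 0))
    (PySem.List.pyGetD (l.drop i) (argB gt (l.drop i)) 0)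
  rw [h3] at h4
  rw [h4, stepB, PySem.List.pySetD_of_nonneg _ _ hp0, PySem.List.pySetD_of_nonneg _ _ (le_refl 0), Int.toNat_zero]

theorem parity_succ (i : Nat) : (((i + 1) % 2 == 0) : Bool) = !(i % 2 == 0) := by
  rcases Nat.mod_two_eq_zero_or_one i with h | h <;> simp [Nat.add_mod, h]

theorem aBody_decomp (l : List Int) (i : Nat) (hi : i < l.length) :
    aBody l (i : Int) = l.take i ++ stepB (i % 2 == 0) (l.drop i) := by
  have hmod : PySem.Int.mod (i : Int) 2 = ((i % 2 : Nat) : Int) := by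
    rw [PySem.Int.mod_eq_emod_of_pos (by norm_num)]
    omega
  rw [aBody, hmod]
  by_cases h : i % 2 = 0
  · rw [h]
    simp only [Nat.cast_zero, beq_self_eq_true, if_true]
    rw [aArgMax_shift l i hi, aSwap_step true l i hi]
  · have h1 : i % 2 = 1 := by omega
    rw [h1]
    simp only [Nat.cast_one]
    rw [if_neg (by simp), aArgMin_shift l i hi, aSwap_step false l i hi]
    rfl

theorem loop_peel (l : List Int) (i : Nat) (hi : i ≤ l.length) :
    (PySem.List.pyRange (i : Int) ((l.length : Int) - 1) 1).foldl aBody l =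
      l.take i ++ peel (i % 2 == 0) (l.drop i) := by
  have main : ∀ (k : Nat) (l : List Int) (i : Nat), l.length - i ≤ k → i ≤ l.length →
      (PySem.List.pyRange (i : Int) ((l.length : Int) - 1) 1).foldl aBody l =
        l.take i ++ peel (i % 2 == 0) (l.drop i) := by
    intro k
    induction k with
    | zero =>
      intro l i hk hi
      have hieq : i = l.length := by omega
      rw [PySem.List.pyRange_one_eq_nil (by omega)]
      simp only [List.foldl_nil]
      rw [List.drop_of_length_le (by omega), peel_nil, List.take_of_length_le (by omega)]
      simp
    | succ k ih =>
      intro l i hk hi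
      by_cases hsmall : (l.length : Int) - 1 ≤ (i : Int)
      · rw [PySem.List.pyRange_one_eq_nil hsmall]
        simp only [List.foldl_nil]
        rw [peel_small _ _ (by simp; omega), List.take_append_drop]
      · have hstep : i + 1 < l.length := by omega
        rw [PySem.List.pyRange_one_cons (by omega)]
        simp only [List.foldl_cons]
        rw [aBody_decomp l i (by omega)]
        obtain ⟨hd, tl, hcons⟩ : ∃ hd tl, stepB (i % 2 == 0) (l.drop i) = hd :: tl := by
          cases hs : stepB (i % 2 == 0) (l.drop i) with
          | nil =>
            have := congrArg List.length hs
            rw [length_stepB] at this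
            simp at this
            omega
          | cons hd tl => exact ⟨hd, tl, rfl⟩
        have htake : (l.take i).length = i := by simp; omega
        have hlen' : (l.take i ++ stepB (i % 2 == 0) (l.drop i)).length = l.length := by
          simp [length_stepB]
          omega
        have hIH := ih (l.take i ++ stepB (i % 2 == 0) (l.drop i)) (i + 1)
          (by rw [hlen']; omega) (by rw [hlen']; omega)
        rw [hlen'] at hIH
        rw [show ((i : Int) + 1) = ((i + 1 : Nat) : Int) by push_cast; ring, hIH]
        rw [hcons, take_append_len _ _ i htake, drop_append_len _ _ i htake]
        rw [show (hd :: tl).take 1 = [hd] from rfl, show (hd :: tl).drop 1 = tl from rfl]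
        obtain ⟨x, u, hxu⟩ : ∃ x u, l.drop i = x :: u := by
          cases hd' : l.drop i with
          | nil =>
            have := congrArg List.length hd'
            simp at this
            omega
          | cons x u => exact ⟨x, u, rfl⟩
        rw [hxu, peel_cons, ← hxu, hcons]
        simp only [List.headI_cons, List.tail_cons]
        rw [parity_succ]
        simp [List.append_assoc]
  exact main (l.length - i) l i (le_refl _) hi

theorem take_last {α : Type} (xs : List α) (k : Nat) (h : k < xs.length) :
    xs.take (k + 1) = xs.take k ++ [xs[k]] := by
  rw [List.take_add_one, List.getElem?_eq_getElem h]
  rfl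

theorem bGo_spec (s : List Int) : ∀ (fuel : Nat) (a : Nat) (j : Int),
    j < (s.length : Int) → j + 1 - (a : Int) ≤ (fuel : Int) →
    bGo s fuel (a : Int) j = wv true ((s.drop a).take (j + 1 - (a : Int)).toNat) := by
  intro fuel
  induction fuel with
  | zero =>
    intro a j hj hf
    rw [show (j + 1 - (a : Int)).toNat = 0 by omega]
    simp [bGo, wv_nil]
  | succ fuel ih =>
    intro a j hj hf
    by_cases hij : (a : Int) ≤ j
    · have haj : a ≤ j.toNat := by omega
      have hjlt : j.toNat < s.length := by omega
      have halt : a < s.length := by omega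
      set m := (j + 1 - (a : Int)).toNat with hm
      have hm1 : 1 ≤ m := by omega
      have hdlen : (s.drop a).length = s.length - a := by simp
      have hmle : m - 1 < (s.drop a).length := by omega
      have hidx : a + (m - 1) = j.toNat := by omega
      have h5 : (s.drop a)[m - 1]'hmle = s[j.toNat]'hjlt := by
        rw [List.getElem_drop]
        simp only [hidx]
      have hseg : (s.drop a).take m = (s.drop a).take (m - 1) ++ [s[j.toNat]'hjlt] := by
        rw [show m = (m - 1) + 1 by omega, take_last _ _ hmle, h5]
        simp
      have hgj : PySem.List.pyGetD s j 0 = s[j.toNat]'hjlt :=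
        PySem.List.pyGetD_eq_getElem s 0 (by omega) hj
      have hcast : ((a + 1 : Nat) : Int) = (a : Int) + 1 := by push_cast; ring
      by_cases hlt : (a : Int) < j
      · have hm2 : 2 ≤ m := by omega
        have hseg2 : (s.drop a).take (m - 1) = s[a]'halt :: (s.drop (a + 1)).take (m - 2) := by
          rw [show m - 1 = (m - 2) + 1 by omega, List.drop_eq_getElem_cons halt, List.take_succ_cons]
        have hga : PySem.List.pyGetD s (a : Int) 0 = s[a]'halt := by
          rw [PySem.List.pyGetD_eq_getElem s 0 (by omega) (by omega)]
          simp
        have hb1 : j - 1 < (s.length : Int) := by omega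
        have hb2 : (j - 1) + 1 - ((a + 1 : Nat) : Int) ≤ (fuel : Int) := by
          rw [hcast]; omega
        have hIH := ih (a + 1) (j - 1) hb1 hb2
        rw [hcast] at hIH
        have hm2' : ((j - 1) + 1 - ((a : Int) + 1)).toNat = m - 2 := by omega
        rw [hm2'] at hIH
        rw [bGo, if_pos hij, if_pos hlt, hgj, hga, hseg, wv_true_concat, hseg2, wv_false_cons, ← hIH]
        simp
      · have hm1' : m = 1 := by omega
        have hb1 : j - 1 < (s.length : Int) := by omega
        have hb2 : (j - 1) + 1 - ((a + 1 : Nat) : Int) ≤ (fuel : Int) := by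
          rw [hcast]; omega
        have hIH := ih (a + 1) (j - 1) hb1 hb2
        rw [hcast] at hIH
        have hm0' : ((j - 1) + 1 - ((a : Int) + 1)).toNat = 0 := by omega
        rw [hm0'] at hIH
        simp only [List.take_zero, wv_nil] at hIH
        rw [bGo, if_pos hij, if_neg hlt, hgj, hseg, wv_true_concat, show m - 1 = 0 by omega]
        simp [hIH, wv_nil]
    · rw [bGo, if_neg hij]
      rw [show (j + 1 - (a : Int)).toNat = 0 by omega]
      simp [wv_nil]

-- ===== VERDICT (by name: the statement is the Claim_ definition above) =====
theorem special_sort_spec : Claim_equal_special_sort := by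
  intro l _
  unfold Spec_special_sort
  simp only [special_sort, special_sort_alt]
  rw [PySem.List.slice_to _ (by norm_num : (0 : Int) ≤ 10),
    PySem.List.slice_to _ (by norm_num : (0 : Int) ≤ 10)]
  congr 1
  have h0 := loop_peel l 0 (by omega)
  simp only [Nat.cast_zero, List.take_zero, List.nil_append, List.drop_zero, Nat.zero_mod,
    beq_self_eq_true] at h0
  rw [h0, peel_eq_wv]
  by_cases hs : PySem.List.sorted l (fun x => x) false = []
  · rw [hs]
    simp [bGo, wv_nil]
  · have hlen : 0 < (PySem.List.sorted l (fun x => x) false).length := List.length_pos_iff.mpr hs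
    have hb := bGo_spec (PySem.List.sorted l (fun x => x) false)
      (PySem.List.sorted l (fun x => x) false).length 0
      (((PySem.List.sorted l (fun x => x) false).length : Int) - 1) (by omega) (by simp)
    simp only [Nat.cast_zero, List.drop_zero, sub_zero] at hb
    rw [hb, show ((((PySem.List.sorted l (fun x => x) false).length : Int) - 1 + 1).toNat) =
      (PySem.List.sorted l (fun x => x) false).length by omega, List.take_length]
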